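-- pv_equiv track=rewrite | github.com/P-Barreira/Forest_Height_thesis | Speckle_filter_final.py | row_list
-- ===== SOURCE A (Python) =====
-- def row_list(orig_array,WL,orig_row_width,U_D,L_R):
--     # U_D ranges from -3 to 3 and L_R ranges from 0 to 3; if 0 then same line (U_D) or same column (L_R)
--     result = list(orig_array[(WL)+orig_row_width*U_D:(WL)+orig_row_width*(U_D+1)])
--
--     # if in center column
--     if L_R == 0:
--         return result
--
--     if L_R < 0:
--         L_R = -L_R
--         for L in range(1,L_R+1):
--             result.insert(0,result[0])
--             result.pop(len(result)-1)
--     else: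
--         for L in range(1,L_R+1):
--             result.append(result[len(result)-1])
--             result.pop(0)
--
--     return result
-- ===== SOURCE B (Python) =====
-- def row_list(orig_array, WL, orig_row_width, U_D, L_R):
--     result = list(orig_array[WL + orig_row_width * U_D : WL + orig_row_width * (U_D + 1)])
--     if L_R == 0:
--         return result
--     n = len(result)
--     if L_R < 0:
--         k = -L_R
--         return [result[0]] * min(k, n) + result[:max(0, n - k)]
--     k = L_R
--     return result[min(k, n):] + [result[-1]] * min(k, n)
-- ===== Notes on version B (the rewrite author's own statement) =====
-- stated objective: simpler
-- what changed: Replaces the two insert/pop shift loops with a single closed-form slice-and-pad expression per direction (edge value replicated min(|L_R|,n) times concatenated with the clamped slice).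
import Mathlib
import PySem

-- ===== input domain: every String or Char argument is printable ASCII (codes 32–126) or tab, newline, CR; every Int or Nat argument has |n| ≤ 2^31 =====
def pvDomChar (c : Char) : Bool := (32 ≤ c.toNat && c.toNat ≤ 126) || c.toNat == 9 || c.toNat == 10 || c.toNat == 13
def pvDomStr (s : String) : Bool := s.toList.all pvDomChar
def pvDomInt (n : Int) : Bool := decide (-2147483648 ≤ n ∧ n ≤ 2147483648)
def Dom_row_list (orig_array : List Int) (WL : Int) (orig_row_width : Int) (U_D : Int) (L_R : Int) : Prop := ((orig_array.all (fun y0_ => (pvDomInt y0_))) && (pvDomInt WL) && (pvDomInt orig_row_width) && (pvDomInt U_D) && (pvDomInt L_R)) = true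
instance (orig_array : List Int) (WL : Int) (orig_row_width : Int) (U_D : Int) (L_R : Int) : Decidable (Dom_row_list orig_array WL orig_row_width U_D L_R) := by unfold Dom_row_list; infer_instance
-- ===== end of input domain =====

-- B replaces A's two insert/pop shift loops by one closed-form slice-and-pad expression per direction (objective: simpler).

-- ===== PORT A =====
-- one step of A's left-shift loop body: result.insert(0, result[0]); result.pop(len(result)-1)
def rlStepL (r : List Int) : List Int :=
  let r1 := PySem.List.insert r 0 (PySem.List.pyGetD r 0 0)
  ((PySem.List.pop? r1 (PySem.List.len r1 - 1)).map Prod.snd).getD r1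

-- one step of A's right-shift loop body: result.append(result[len(result)-1]); result.pop(0)
def rlStepR (r : List Int) : List Int :=
  let r1 := r ++ [PySem.List.pyGetD r (PySem.List.len r - 1) 0]
  ((PySem.List.pop? r1 0).map Prod.snd).getD r1

def row_list (orig_array : List Int) (WL : Int) (orig_row_width : Int) (U_D : Int) (L_R : Int) : List Int :=
  let result := PySem.List.slice orig_array (some (WL + orig_row_width * U_D)) (some (WL + orig_row_width * (U_D + 1)))
  if L_R == 0 then result
  else if L_R < 0 then
    let k := -L_R
    (PySem.List.pyRange 1 (k + 1) 1).foldl (fun r _ => rlStepL r) result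
  else
    (PySem.List.pyRange 1 (L_R + 1) 1).foldl (fun r _ => rlStepR r) result

-- ===== PORT B =====
def row_list_alt (orig_array : List Int) (WL : Int) (orig_row_width : Int) (U_D : Int) (L_R : Int) : List Int :=
  let result := PySem.List.slice orig_array (some (WL + orig_row_width * U_D)) (some (WL + orig_row_width * (U_D + 1)))
  if L_R == 0 then result
  else
    let n := PySem.List.len result
    if L_R < 0 then
      let k := -L_R
      List.replicate (min k n).toNat (PySem.List.pyGetD result 0 0)
        ++ PySem.List.slice result none (some (max 0 (n - k)))
    else
      let k := L_R
      PySem.List.slice result (some (min k n)) none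
        ++ List.replicate (min k n).toNat (PySem.List.pyGetD result (-1) 0)

-- ===== PRECONDITION & SPEC =====
-- Pre_ excludes exactly the inputs on which A raises IndexError (indexing result[0] / result[-1]
-- on an empty extracted row with L_R ≠ 0); B raises the same IndexError there.
def Pre_row_list (orig_array : List Int) (WL : Int) (orig_row_width : Int) (U_D : Int) (L_R : Int) : Prop :=
  L_R = 0 ∨ PySem.List.slice orig_array (some (WL + orig_row_width * U_D)) (some (WL + orig_row_width * (U_D + 1))) ≠ []
instance (orig_array : List Int) (WL : Int) (orig_row_width : Int) (U_D : Int) (L_R : Int) : Decidable (Pre_row_list orig_array WL orig_row_width U_D L_R) := by unfold Pre_row_list; infer_instance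

def pvWitness_row_list : List Int × Int × Int × Int × Int := ([5, 1, 2, 3, 9], 1, 3, 0, -2)

def Spec_row_list (orig_array : List Int) (WL : Int) (orig_row_width : Int) (U_D : Int) (L_R : Int) (out : List Int) : Prop := out = row_list_alt orig_array WL orig_row_width U_D L_R
instance (orig_array : List Int) (WL : Int) (orig_row_width : Int) (U_D : Int) (L_R : Int) (out : List Int) : Decidable (Spec_row_list orig_array WL orig_row_width U_D L_R out) := by unfold Spec_row_list; infer_instance

-- ===== CLAIM (what is proved, stated in full; the proofs are below) =====
def Claim_equal_row_list : Prop := ∀ (orig_array : List Int) (WL : Int) (orig_row_width : Int) (U_D : Int) (L_R : Int), Dom_row_list orig_array WL orig_row_width U_D L_R → Pre_row_list orig_array WL orig_row_width U_D L_R → Spec_row_list orig_array WL orig_row_width U_D L_R (row_list orig_array WL orig_row_width U_D L_R)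

-- ===== LEMMAS AND PROOFS =====

theorem rlStepL_cons (h : Int) (t : List Int) :
    rlStepL (h :: t) = h :: (h :: t).dropLast := by
  have h1 : PySem.List.insert (h::t) 0 (PySem.List.pyGetD (h::t) 0 0) = h::h::t := by
    have hm : min (0:Int) ((t.length:Int)+1) = 0 := min_eq_left (by positivity)
    simp [PySem.List.insert, PySem.List.sliceIndices, pysem, hm]
  rw [rlStepL]
  simp only [h1]
  have h2 : PySem.List.len (h::h::t) - 1 = ((t.length + 1 : Nat) : Int) := by
    simp [pysem]
  rw [h2, PySem.List.pop?_natCast _ _ (by simp)]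
  simp
  exact (List.dropLast_eq_eraseIdx (by simp)).symm

theorem rlStepR_nonempty (r : List Int) (hr : r ≠ []) :
    rlStepR r = r.tail ++ [r.getLast hr] := by
  have h1 : PySem.List.pyGetD r (PySem.List.len r - 1) 0 = r.getLast hr := by
    have he : PySem.List.len r - 1 = ((r.length - 1 : Nat) : Int) := by
      have : r.length ≠ 0 := by simpa using hr
      simp [pysem]; omega
    rw [he, PySem.List.pyGetD_natCast]
    have hn : r.length ≠ 0 := by simpa using hr
    rw [List.getD_eq_getElem _ _ (by omega)]
    exact (List.getLast_eq_getElem hr).symm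
  rw [rlStepR]
  simp only [h1]
  cases r with
  | nil => simp at hr
  | cons x xs =>
    rw [show (x::xs) ++ [(x::xs).getLast hr] = x :: (xs ++ [(x::xs).getLast hr]) by simp]
    rw [PySem.List.pop?_zero_cons]
    simp

theorem replicate_append_cons (j : Nat) (a : Int) (x : List Int) :
    List.replicate j a ++ a :: x = a :: (List.replicate j a ++ x) := by
  induction j with
  | zero => simp
  | succ j ih => simp [List.replicate_succ, ih]

theorem iterate_stepL (h0 : Int) (t : List Int) (j : Nat) :
    rlStepL^[j] (h0 :: t) =
      List.replicate (min j (t.length + 1)) h0 ++ (h0 :: t).take (t.length + 1 - j) := by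
  induction j with
  | zero => simp
  | succ j ih =>
    rw [Function.iterate_succ_apply', ih]
    by_cases hj : j < t.length + 1
    · have hmj : min j (t.length + 1) = j := by omega
      have h1 : t.length + 1 - j = (t.length - j) + 1 := by omega
      rw [hmj, h1, List.take_succ_cons, replicate_append_cons, rlStepL_cons]
      have hY : (List.replicate j h0 ++ List.take (t.length - j) t).length = t.length := by
        simp; omega
      rw [List.dropLast_eq_take]
      simp only [List.length_cons, hY]
      by_cases hj2 : j < t.length
      · rw [show t.length + 1 - 1 = (t.length - 1) + 1 by omega, List.take_succ_cons,
            List.take_append, List.take_replicate, List.take_take]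
        simp only [List.length_replicate]
        rw [show min (t.length - 1) j = j by omega,
            show min (t.length - 1 - j) (t.length - j) = t.length - 1 - j by omega,
            show min (j+1) (t.length+1) = j+1 by omega,
            show t.length + 1 - (j+1) = (t.length - 1 - j) + 1 by omega,
            List.take_succ_cons, replicate_append_cons]
        simp [List.replicate_succ]
      · have hjt : j = t.length := by omega
        rw [show t.length - j = 0 by omega]
        simp only [List.take_zero, List.append_nil]
        rw [show min (j+1) (t.length+1) = t.length+1 by omega,
            show t.length + 1 - (j+1) = 0 by omega,
            show t.length + 1 - 1 = t.length by omega, hjt]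
        rw [show List.take t.length (h0 :: List.replicate t.length h0) = List.replicate t.length h0 by
          rw [← List.replicate_succ, List.take_replicate]; simp]
        simp [List.replicate_succ]
    · have hm : min j (t.length + 1) = t.length + 1 := by omega
      have hm' : min (j+1) (t.length + 1) = t.length + 1 := by omega
      have hz : t.length + 1 - j = 0 := by omega
      have hz' : t.length + 1 - (j+1) = 0 := by omega
      rw [hm, hm', hz, hz']
      simp only [List.take_zero, List.append_nil, List.replicate_succ, rlStepL_cons]
      rw [show (h0 :: List.replicate t.length h0).dropLast = List.replicate t.length h0 by
        rw [← List.replicate_succ, List.dropLast_replicate]; simp]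

theorem getLast_append_replicate (xs : List Int) (m : Nat) (hm : m ≠ 0) (e : Int)
    (h : xs ++ List.replicate m e ≠ []) : (xs ++ List.replicate m e).getLast h = e := by
  rw [List.getLast_append_of_ne_nil h (by simp; omega)]
  cases m with
  | zero => omega
  | succ k => exact List.getLast_replicate _

theorem iterate_stepR (r : List Int) (hr : r ≠ []) (j : Nat) :
    rlStepR^[j] r = r.drop (min j r.length) ++ List.replicate (min j r.length) (r.getLast hr) := by
  have hn1 : 1 ≤ r.length := by
    cases r with | nil => simp at hr | cons a b => simp
  induction j with
  | zero => simp
  | succ j ih =>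
    rw [Function.iterate_succ_apply', ih]
    set e := r.getLast hr with he
    set m := min j r.length with hm
    have hmle : m ≤ r.length := by omega
    have hprev : r.drop m ++ List.replicate m e ≠ [] := by
      intro hc
      have hlen := congrArg List.length hc
      simp at hlen
      omega
    rw [rlStepR_nonempty _ hprev]
    have hlast : (r.drop m ++ List.replicate m e).getLast hprev = e := by
      by_cases hj0 : m = 0
      · simp [hj0, he]
      · exact getLast_append_replicate _ _ hj0 _ _
    rw [hlast]
    by_cases hj : j < r.length
    · have hmm : m = j := by omega
      have hdne : r.drop m ≠ [] := by
        intro hc; have := congrArg List.length hc; simp [hmm] at this; omega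
      rw [List.tail_append_of_ne_nil hdne, List.tail_drop]
      rw [show min (j+1) r.length = m + 1 by omega]
      simp [List.replicate_succ']
    · have hmm : m = r.length := by omega
      rw [show min (j+1) r.length = r.length by omega]
      rw [hmm, List.drop_length, List.nil_append]
      have hm1 : r.length = (r.length - 1)+1 := by omega
      rw [hm1, List.replicate_succ, List.tail_cons, ← List.replicate_succ']
      exact List.replicate_succ

theorem foldl_const_eq_iterate (f : List Int → List Int) (l : List Int) (init : List Int) :
    l.foldl (fun r _ => f r) init = f^[l.length] init := by
  induction l generalizing init with
  | nil => rfl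
  | cons x xs ih => simp [List.foldl, ih, Function.iterate_succ_apply]

-- ===== VERDICT (by name: the statement is the Claim_ definition above) =====
theorem row_list_spec : Claim_equal_row_list := by
  intro orig_array WL orig_row_width U_D L_R _ hpre
  unfold Pre_row_list at hpre
  unfold Spec_row_list

  rw [row_list, row_list_alt]
  set s := PySem.List.slice orig_array (some (WL + orig_row_width * U_D)) (some (WL + orig_row_width * (U_D + 1))) with hs
  clear_value s
  by_cases h0 : L_R = 0
  · simp [h0]
  · have hsne : s ≠ [] := hpre.resolve_left h0
    simp only [beq_iff_eq, h0, if_false]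
    by_cases hneg : L_R < 0
    · simp only [hneg, if_true]
      rw [foldl_const_eq_iterate, PySem.List.length_pyRange_one]
      obtain ⟨c, t, rfl⟩ : ∃ c t, s = c :: t := by
        cases s with | nil => exact absurd rfl hsne | cons c t => exact ⟨c, t, rfl⟩
      rw [show (-L_R + 1 - 1).toNat = (-L_R).toNat by omega]
      rw [iterate_stepL]
      rw [PySem.List.pyGetD_zero_cons]
      rw [PySem.List.slice_to (c :: t) (b := max 0 (PySem.List.len (c :: t) - -L_R)) (le_max_left 0 _)]
      simp only [PySem.List.len_eq, List.length_cons]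
      congr 1
      · congr 1
        omega
      · congr 1
        omega
    · have hpos : 0 < L_R := by omega
      simp only [hneg, if_false]
      rw [foldl_const_eq_iterate, PySem.List.length_pyRange_one]
      rw [show (L_R + 1 - 1).toNat = L_R.toNat by omega]
      rw [iterate_stepR s hsne]
      rw [PySem.List.pyGetD_neg_one _ _ hsne]
      rw [PySem.List.slice_from s (a := min L_R (PySem.List.len s))
            (le_min hpos.le (by rw [PySem.List.len_eq]; exact Int.natCast_nonneg _))]
      simp only [PySem.List.len_eq]
      congr 1
      · congr 1
        omega
      · congr 1
        omega
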